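-- pv_equiv track=rewrite | github.com/IvanRenison/ProgrammingProblems | 2022-2023 ICPC Brazil Subregional Programming Contest/D.py | solve
-- ===== SOURCE A (Python) =====
-- def solve(n: int, x: int, y: int) -> int:
--     res: int = 0
--     while x != 2**(n-1):
--         if x < 2**(n-1):
--             res += 1
--             x = 2*x
--         else:
--             x = 2**n - x
--     return res
-- ===== SOURCE B (Python) =====
-- def solve(n: int, x: int, y: int) -> int:
--     # Each reflection preserves the number of trailing zero bits of x and each
--     # doubling adds one; x == 2**(n-1) exactly when x has n-1 trailing zeros
--     # (given 0 < x < 2**n).  So the number of doublings is (n-1) - trailing_zeros(x).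
--     t = 0
--     while x % 2 == 0:
--         x //= 2
--         t += 1
--     return (n - 1) - t
-- ===== Notes on version B (the rewrite author's own statement) =====
-- stated objective: faster
-- what changed: Replaces the double/reflect simulation loop (up to ~2n big-integer iterations) by the closed form (n-1) - trailing_zeros(x), computing only the trailing zero bits of x; reflections preserve trailing zeros and each counted doubling adds one. Pre_ excludes n < 1, x <= 0 and x >= 2^n: there A loops forever, except that for x = 0 with hugely negative n the float underflow of 2**(n-1) to 0.0 makes A's int-vs-float loop test accidentally return 0 at once.
-- outside the precondition, e.g. on solve(-2147483648, 0, 8): A returns 0, B does not finish within the time limit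
import Mathlib
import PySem

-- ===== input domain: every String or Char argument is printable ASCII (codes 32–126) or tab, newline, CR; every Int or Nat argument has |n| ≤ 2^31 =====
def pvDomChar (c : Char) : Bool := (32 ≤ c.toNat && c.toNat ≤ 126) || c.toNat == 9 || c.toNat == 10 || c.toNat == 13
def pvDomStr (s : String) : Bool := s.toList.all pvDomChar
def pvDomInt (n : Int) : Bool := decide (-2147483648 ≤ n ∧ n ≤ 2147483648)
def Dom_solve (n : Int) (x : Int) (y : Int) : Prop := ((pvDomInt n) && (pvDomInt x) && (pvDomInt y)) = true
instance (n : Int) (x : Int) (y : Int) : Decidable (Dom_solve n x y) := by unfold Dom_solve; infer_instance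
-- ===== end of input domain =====

-- B replaces A's double/reflect simulation loop by the closed form (n-1) - trailing_zeros(x) (objective: faster).

-- ===== PORT A =====
-- A's `while x != 2**(n-1)` loop; `fuel` is only a totality guard (the proof below shows
-- 2*n.toNat+3 steps always suffice on Pre_solve, where the Python loop terminates).
def solveLoop (fuel : Nat) (n : Int) (x : Int) (res : Int) : Int :=
  match fuel with
  | 0 => res
  | fuel' + 1 =>
    if x = 2 ^ (n - 1).toNat then res
    else if x < 2 ^ (n - 1).toNat then solveLoop fuel' n (2 * x) (res + 1)
    else solveLoop fuel' n (2 ^ n.toNat - x) res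

def solve (n : Int) (x : Int) (y : Int) : Int := solveLoop (2 * n.toNat + 3) n x 0

-- ===== PORT B =====
-- Source B's `while x % 2 == 0: x //= 2; t += 1`; the `x ≠ 0` conjunct only ensures totality
-- (Python diverges at x = 0, which Pre_solve excludes); for even x Python's floor
-- division by 2 is exact, so it coincides with Lean's `x / 2`.
def altLoop (x : Int) (t : Int) : Int :=
  if x % 2 = 0 ∧ x ≠ 0 then altLoop (x / 2) (t + 1) else t
termination_by x.natAbs
decreasing_by omega

def solve_alt (n : Int) (x : Int) (y : Int) : Int := (n - 1) - altLoop x 0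

-- ===== PRECONDITION & SPEC =====
-- Pre_solve excludes n < 1, x ≤ 0 and x ≥ 2^n: there A loops forever, except that for
-- x = 0 with hugely negative n the float underflow of 2**(n-1) to 0.0 makes A's
-- int-vs-float loop test accidentally return 0 at once (B's trailing-zeros loop diverges at x = 0).
def Pre_solve (n : Int) (x : Int) (y : Int) : Prop := 1 ≤ n ∧ 0 < x ∧ x < 2 ^ n.toNat
instance (n : Int) (x : Int) (y : Int) : Decidable (Pre_solve n x y) := by unfold Pre_solve; infer_instance
def pvWitness_solve : Int × Int × Int := (4, 6, 0)

def Spec_solve (n : Int) (x : Int) (y : Int) (out : Int) : Prop := out = solve_alt n x y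
instance (n : Int) (x : Int) (y : Int) (out : Int) : Decidable (Spec_solve n x y out) := by unfold Spec_solve; infer_instance

-- ===== CLAIM (what is proved, stated in full; the proofs are below) =====
def Claim_equal_solve : Prop := ∀ (n : Int) (x : Int) (y : Int), Dom_solve n x y → Pre_solve n x y → Spec_solve n x y (solve n x y)

-- ===== LEMMAS AND PROOFS =====

-- trailing-zeros count on Nat (proof-side mirror of B's loop)
def tz (m : Nat) : Nat :=
  if h : m % 2 = 0 ∧ m ≠ 0 then tz (m / 2) + 1 else 0
termination_by m
decreasing_by omega

theorem tz_two_pow_mul (t u : Nat) (hu : u % 2 = 1) : tz (2 ^ t * u) = t := by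
  induction t with
  | zero => rw [tz, dif_neg]; omega
  | succ t ih =>
    rw [tz, dif_pos]
    · have h2 : 2 ^ (t + 1) * u / 2 = 2 ^ t * u := by
        have h : 2 ^ (t + 1) * u = 2 * (2 ^ t * u) := by ring
        omega
      rw [h2, ih]
    · have h : 2 ^ (t + 1) * u = 2 * (2 ^ t * u) := by ring
      have hp : 0 < 2 ^ t := Nat.two_pow_pos t
      have hq : 0 < 2 ^ t * u := Nat.mul_pos hp (by omega)
      constructor <;> omega

theorem tz_decomp : ∀ m, 0 < m → ∃ u, u % 2 = 1 ∧ m = 2 ^ tz m * u := by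
  intro m
  induction m using Nat.strong_induction_on with
  | _ m ih =>
    intro hm
    by_cases h : m % 2 = 0
    · obtain ⟨u, hu, hdec⟩ := ih (m / 2) (by omega) (by omega)
      refine ⟨u, hu, ?_⟩
      rw [tz, dif_pos ⟨h, by omega⟩, pow_succ]
      have h3 : 2 ^ tz (m / 2) * 2 * u = 2 * (2 ^ tz (m / 2) * u) := by ring
      omega
    · refine ⟨m, by omega, ?_⟩
      rw [tz, dif_neg (by omega)]
      simp

theorem two_pow_tz_le (m : Nat) (hm : 0 < m) : 2 ^ tz m ≤ m := by
  obtain ⟨u, hu, hdec⟩ := tz_decomp m hm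
  have h1 : 2 ^ tz m * 1 ≤ 2 ^ tz m * u := Nat.mul_le_mul_left _ (by omega)
  omega

theorem altLoop_eq : ∀ (m : Nat) (x t : Int), x.toNat = m → 0 < x → altLoop x t = t + (tz m : Int) := by
  intro m
  induction m using Nat.strong_induction_on with
  | _ m ih =>
    intro x t hm hx
    by_cases h : x % 2 = 0
    · rw [altLoop, if_pos ⟨h, by omega⟩]
      rw [ih (m / 2) (by omega) (x / 2) (t + 1) (by omega) (by omega)]
      have hz : tz m = tz (m / 2) + 1 := by rw [tz, dif_pos ⟨by omega, by omega⟩]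
      rw [hz]
      push_cast; ring
    · rw [altLoop, if_neg (by omega)]
      rw [tz, dif_neg (by omega)]
      simp

theorem loopA : ∀ (k fuel : Nat) (n : Int) (m : Nat) (res : Int),
    1 ≤ n → 0 < m → m < 2 ^ ((n - 1).toNat + 1) → (n - 1).toNat = tz m + k →
    2 * k + 1 ≤ fuel → solveLoop fuel n (m : Int) res = res + (k : Int) := by
  intro k
  induction k with
  | zero =>
    intro fuel n m res hn hm hlt htz hfuel
    obtain ⟨u, hu, hdec⟩ := tz_decomp m hm
    have hpa : 0 < 2 ^ (n - 1).toNat := Nat.two_pow_pos _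
    have ht : tz m = (n - 1).toNat := by omega
    rw [ht] at hdec
    have hme : m = 2 ^ (n - 1).toNat := by
      rw [pow_succ] at hlt
      have h1 : 2 ^ (n - 1).toNat * u < 2 ^ (n - 1).toNat * 2 := by omega
      have h2 : u < 2 := Nat.lt_of_mul_lt_mul_left h1
      have hu1 : u = 1 := by omega
      rw [hu1, Nat.mul_one] at hdec
      exact hdec
    cases fuel with
    | zero => omega
    | succ f =>
      rw [solveLoop, if_pos (by rw [hme]; push_cast; ring)]
      simp
  | succ k ih =>
    intro fuel n m res hn hm hlt htz hfuel
    obtain ⟨u, hu, hdec⟩ := tz_decomp m hm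
    have hp : 0 < 2 ^ tz m := Nat.two_pow_pos _
    have hpa : 0 < 2 ^ (n - 1).toNat := Nat.two_pow_pos _
    have hpow_a1 : 2 ^ ((n - 1).toNat + 1) = 2 ^ (n - 1).toNat * 2 := by rw [pow_succ]
    have hne : m ≠ 2 ^ (n - 1).toNat := by
      intro h
      have h1 : tz m = (n - 1).toNat := by
        rw [h, ← Nat.mul_one (2 ^ (n - 1).toNat), tz_two_pow_mul _ 1 (by norm_num)]
      omega
    have hnaT : n.toNat = (n - 1).toNat + 1 := by omega
    have hcastpow : ((2 ^ (n - 1).toNat : Nat) : Int) = (2 : Int) ^ (n - 1).toNat := by push_cast; ring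
    have hcondne : ¬ ((m : Int) = 2 ^ (n - 1).toNat) := by
      rw [← hcastpow]; exact_mod_cast hne
    cases fuel with
    | zero => omega
    | succ f =>
      rw [solveLoop, if_neg hcondne]
      by_cases hlt2 : m < 2 ^ (n - 1).toNat
      · rw [if_pos (by rw [← hcastpow]; exact_mod_cast hlt2)]
        have hc : (2 : Int) * (m : Int) = ((2 * m : Nat) : Int) := by push_cast; ring
        have htz2 : tz (2 * m) = tz m + 1 := by
          conv_lhs => rw [hdec]
          rw [show 2 * (2 ^ tz m * u) = 2 ^ (tz m + 1) * u from by ring, tz_two_pow_mul _ _ hu]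
        rw [hc, ih f n (2 * m) (res + 1) hn (by omega) (by omega) (by omega) (by omega)]
        push_cast; ring
      · rw [if_neg (by rw [← hcastpow]; exact_mod_cast hlt2)]
        have hmgt : 2 ^ (n - 1).toNat < m := by omega
        -- reflected value m' = 2^n - m, as a Nat
        set m' : Nat := 2 ^ ((n - 1).toNat + 1) - m with hm'
        have hcast2 : (2 : Int) ^ n.toNat - (m : Int) = ((m' : Nat) : Int) := by
          rw [hnaT, hm']
          rw [Nat.cast_sub hlt.le]; push_cast; ring
        have htlt : tz m < (n - 1).toNat + 1 := by
          have h2t := two_pow_tz_le m hm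
          have := lt_of_le_of_lt h2t hlt
          exact (Nat.pow_lt_pow_iff_right (by norm_num)).1 this
        have hsplit : (n - 1).toNat + 1 = tz m + ((n - 1).toNat + 1 - tz m) := by omega
        have hulow : u < 2 ^ ((n - 1).toNat + 1 - tz m) := by
          have h1 : 2 ^ tz m * u < 2 ^ tz m * 2 ^ ((n - 1).toNat + 1 - tz m) := by
            rw [← pow_add, ← hsplit, ← hdec]; exact hlt
          exact Nat.lt_of_mul_lt_mul_left h1
        have hm'dec : m' = 2 ^ tz m * (2 ^ ((n - 1).toNat + 1 - tz m) - u) := by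
          rw [hm', Nat.mul_sub, ← pow_add, ← hsplit]
          conv_lhs => rw [hdec]
        have hodd : (2 ^ ((n - 1).toNat + 1 - tz m) - u) % 2 = 1 := by
          obtain ⟨s, hs⟩ : ∃ s, (n - 1).toNat + 1 - tz m = s + 1 := ⟨(n - 1).toNat - tz m, by omega⟩
          rw [hs, pow_succ]
          rw [hs, pow_succ] at hulow
          omega
        have htzm' : tz m' = tz m := by rw [hm'dec, tz_two_pow_mul _ _ hodd]
        have hm'lt : m' < 2 ^ (n - 1).toNat := by omega
        have hm'pos : 0 < m' := by omega
        cases f with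
        | zero => omega
        | succ f' =>
          rw [hcast2, solveLoop,
            if_neg (by rw [← hcastpow]; exact_mod_cast (by omega : m' ≠ 2 ^ (n - 1).toNat)),
            if_pos (by rw [← hcastpow]; exact_mod_cast hm'lt)]
          have hc : (2 : Int) * (m' : Int) = ((2 * m' : Nat) : Int) := by push_cast; ring
          obtain ⟨u', hu', hdec'⟩ := tz_decomp m' hm'pos
          have htz2 : tz (2 * m') = tz m + 1 := by
            conv_lhs => rw [hdec']
            rw [show 2 * (2 ^ tz m' * u') = 2 ^ (tz m' + 1) * u' from by ring,
              tz_two_pow_mul _ _ hu', htzm']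
          rw [hc, ih f' n (2 * m') (res + 1) hn (by omega) (by omega) (by omega) (by omega)]
          push_cast; ring

-- ===== VERDICT (by name: the statement is the Claim_ definition above) =====
theorem solve_spec : Claim_equal_solve := by
  unfold Claim_equal_solve
  intro n x y hdom hpre
  obtain ⟨hn, hx, hlt⟩ := hpre
  obtain ⟨m, rfl⟩ : ∃ m : Nat, x = (m : Int) := ⟨x.toNat, by omega⟩
  unfold Spec_solve solve solve_alt
  have hm0 : 0 < m := by exact_mod_cast hx
  have hnaT : n.toNat = (n - 1).toNat + 1 := by omega
  have hltN : m < 2 ^ ((n - 1).toNat + 1) := by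
    rw [← hnaT]; exact_mod_cast hlt
  have htle : tz m ≤ (n - 1).toNat := by
    have h2t := two_pow_tz_le m hm0
    have h3 := lt_of_le_of_lt h2t hltN
    have h4 := (Nat.pow_lt_pow_iff_right (a := 2) (by norm_num)).1 h3
    omega
  rw [altLoop_eq m (m : Int) 0 (by simp) hx]
  rw [loopA ((n - 1).toNat - tz m) (2 * n.toNat + 3) n m 0 hn hm0 hltN (by omega) (by omega)]
  omega
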